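-- pv_equiv track=rewrite | github.com/Niteshp909/Python-Practice-codes | SumOfGCD.py | findGCDSum
-- ===== SOURCE A (Python) =====
-- def findGCDSum(k,a,n):
-- 	GCDSum = 0;
-- 	tempGCD = 0;
-- 	for i in range(n):
--
--
-- 		for j in range(i, n):
--
--
-- 			tempGCD = 0;
-- 			for w in range(i, j + 1):
--
--
-- 				tempGCD = __gcd(tempGCD, a[w]);
--
--
-- 			GCDSum += tempGCD;
--
-- 	return GCDSum;
--
-- def __gcd(a, b):
-- 	return a if(b == 0 ) else __gcd(b, a % b);
-- ===== SOURCE B (Python) =====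
-- def findGCDSum(k, a, n):
--     # One pass per start index: extend the window and update the running GCD
--     # incrementally instead of recomputing it from scratch for every subarray.
--     total = 0
--     for i in range(n):
--         g = 0
--         for j in range(i, n):
--             g = __gcd(g, a[j])
--             total += g
--     return total
--
-- def __gcd(a, b):
--     return a if b == 0 else __gcd(b, a % b)
-- ===== Notes on version B (the rewrite author's own statement) =====
-- stated objective: faster
-- what changed: B drops A's innermost per-subarray recomputation loop by maintaining the running GCD incrementally for each start index, turning O(n^3) gcd steps into O(n^2).
import Mathlib
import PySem

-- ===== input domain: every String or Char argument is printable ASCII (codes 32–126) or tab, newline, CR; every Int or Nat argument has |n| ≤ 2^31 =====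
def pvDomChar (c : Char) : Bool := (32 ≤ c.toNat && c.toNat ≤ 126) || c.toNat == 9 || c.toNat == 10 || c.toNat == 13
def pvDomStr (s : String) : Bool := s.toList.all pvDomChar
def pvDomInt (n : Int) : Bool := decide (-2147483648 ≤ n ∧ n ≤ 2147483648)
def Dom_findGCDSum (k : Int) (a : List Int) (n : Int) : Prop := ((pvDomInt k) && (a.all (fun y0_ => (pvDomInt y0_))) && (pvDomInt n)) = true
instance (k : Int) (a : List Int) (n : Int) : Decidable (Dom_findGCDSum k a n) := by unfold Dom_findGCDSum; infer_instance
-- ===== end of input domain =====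

-- B removes A's innermost loop: the running GCD per start index is maintained incrementally
-- (objective: faster, O(n^2) gcd steps instead of O(n^3)).

-- ===== PORT A =====
-- the module's __gcd: `a if b == 0 else __gcd(b, a % b)` with Python's floored `%`
-- termination: |a % b| < |b| when b ≠ 0
theorem pygcd_dec (a b : Int) (h : b ≠ 0) : (PySem.Int.mod a b).natAbs < b.natAbs := by
  rcases lt_or_gt_of_ne h with hb | hb
  · have := PySem.Int.mod_neg_bounds a hb
    omega
  · have h1 := PySem.Int.mod_nonneg a hb
    have h2 := PySem.Int.mod_lt a hb
    omega

def pygcd (a b : Int) : Int :=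
  if h : b = 0 then a else pygcd b (PySem.Int.mod a b)
termination_by b.natAbs
decreasing_by exact pygcd_dec a b h

-- literal triple loop of A; `a[w]` is in range under Pre_, so `.getD 0` is exact there
def findGCDSum (k : Int) (a : List Int) (n : Int) : Int :=
  (PySem.List.pyRange 0 n 1).foldl (fun GCDSum i =>
    (PySem.List.pyRange i n 1).foldl (fun GCDSum j =>
      GCDSum + (PySem.List.pyRange i (j + 1) 1).foldl
        (fun tempGCD w => pygcd tempGCD (PySem.List.pyGetD a w 0)) 0) GCDSum) 0

-- ===== PORT B =====
-- per start index i, one pass carrying (running gcd g, total)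
def findGCDSum_alt (k : Int) (a : List Int) (n : Int) : Int :=
  (PySem.List.pyRange 0 n 1).foldl (fun total i =>
    ((PySem.List.pyRange i n 1).foldl (fun (st : Int × Int) j =>
        let g := pygcd st.1 (PySem.List.pyGetD a j 0)
        (g, st.2 + g)) (0, total)).2) 0

-- ===== PRECONDITION & SPEC =====
-- Pre_ excludes exactly the inputs where Python A raises IndexError: n > len(a)
def Pre_findGCDSum (k : Int) (a : List Int) (n : Int) : Prop := n ≤ (a.length : Int)
instance (k : Int) (a : List Int) (n : Int) : Decidable (Pre_findGCDSum k a n) := by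
  unfold Pre_findGCDSum; infer_instance
def pvWitness_findGCDSum : Int × List Int × Int := (0, [6, 4, 10], 3)

def Spec_findGCDSum (k : Int) (a : List Int) (n : Int) (out : Int) : Prop := out = findGCDSum_alt k a n
instance (k : Int) (a : List Int) (n : Int) (out : Int) : Decidable (Spec_findGCDSum k a n out) := by
  unfold Spec_findGCDSum; infer_instance

-- ===== CLAIM (what is proved, stated in full; the proofs are below) =====
def Claim_equal_findGCDSum : Prop := ∀ (k : Int) (a : List Int) (n : Int), Dom_findGCDSum k a n → Pre_findGCDSum k a n → Spec_findGCDSum k a n (findGCDSum k a n)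

-- ===== LEMMAS AND PROOFS =====

-- A's from-scratch fold over indices i..m equals one incremental gcd step on the fold over i..m-1
theorem recompute_step (a : List Int) (i m : Int) (him : i ≤ m) :
    (PySem.List.pyRange i (m + 1) 1).foldl
        (fun t w => pygcd t (PySem.List.pyGetD a w 0)) 0 =
      pygcd ((PySem.List.pyRange i m 1).foldl
        (fun t w => pygcd t (PySem.List.pyGetD a w 0)) 0) (PySem.List.pyGetD a m 0) := by
  rw [PySem.List.pyRange_one_succ_right him, List.foldl_append]
  rfl

-- loop invariant: starting B's inner loop at index m with running gcd = A's fold over i..m-1,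
-- B's carried total advances exactly like A's inner loop on the remaining indices
theorem inner_eq (a : List Int) (i : Int) : ∀ (m n s : Int), i ≤ m →
    ((PySem.List.pyRange m n 1).foldl (fun (st : Int × Int) j =>
        let g := pygcd st.1 (PySem.List.pyGetD a j 0)
        (g, st.2 + g))
      ((PySem.List.pyRange i m 1).foldl (fun t w => pygcd t (PySem.List.pyGetD a w 0)) 0, s)).2 =
    (PySem.List.pyRange m n 1).foldl (fun acc j =>
      acc + (PySem.List.pyRange i (j + 1) 1).foldl
        (fun t w => pygcd t (PySem.List.pyGetD a w 0)) 0) s := by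
  intro m n s him
  by_cases hmn : m < n
  · rw [PySem.List.pyRange_one_cons hmn, List.foldl_cons, List.foldl_cons]
    simp only []
    rw [← recompute_step a i m him]
    exact inner_eq a i (m + 1) n
      (s + (PySem.List.pyRange i (m + 1) 1).foldl
        (fun t w => pygcd t (PySem.List.pyGetD a w 0)) 0) (by omega)
  · rw [PySem.List.pyRange_one_eq_nil (show n ≤ m by omega)]
    rfl
termination_by m n _ _ => (n - m).toNat
decreasing_by omega

-- for every start index i, B's inner one-pass loop equals A's inner recomputation loop
theorem body_eq (a : List Int) (n i total : Int) :
    ((PySem.List.pyRange i n 1).foldl (fun (st : Int × Int) j =>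
        let g := pygcd st.1 (PySem.List.pyGetD a j 0)
        (g, st.2 + g)) (0, total)).2 =
    (PySem.List.pyRange i n 1).foldl (fun acc j =>
      acc + (PySem.List.pyRange i (j + 1) 1).foldl
        (fun t w => pygcd t (PySem.List.pyGetD a w 0)) 0) total := by
  have h := inner_eq a i i n total le_rfl
  rw [PySem.List.pyRange_one_eq_nil (le_refl i)] at h
  exact h

-- ===== VERDICT (by name: the statement is the Claim_ definition above) =====
theorem findGCDSum_spec : Claim_equal_findGCDSum := by
  intro k a n _ _
  unfold Spec_findGCDSum findGCDSum findGCDSum_alt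
  rw [show (fun total i => ((PySem.List.pyRange i n 1).foldl (fun (st : Int × Int) j =>
        let g := pygcd st.1 (PySem.List.pyGetD a j 0)
        (g, st.2 + g)) (0, total)).2) =
      (fun GCDSum i => (PySem.List.pyRange i n 1).foldl (fun GCDSum j =>
        GCDSum + (PySem.List.pyRange i (j + 1) 1).foldl
          (fun tempGCD w => pygcd tempGCD (PySem.List.pyGetD a w 0)) 0) GCDSum)
    from funext fun total => funext fun i => body_eq a n i total]
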